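-- pv_equiv track=rewrite | github.com/not-so-daily-practice/advent-of-code-2018 | src/day_5.py | react_polymer
-- ===== SOURCE A (Python) =====
-- def react_polymer(polymer):
--     processed = []
--     for c in polymer:
--         if processed and c == processed[-1].swapcase():
--             processed.pop()
--         else:
--             processed.append(c)
--
--     return len(processed)
-- ===== SOURCE B (Python) =====
-- def react_polymer(polymer):
--     chars = list(polymer)
--     while True:
--         for i in range(len(chars) - 1):
--             if chars[i + 1] == chars[i].swapcase():
--                 del chars[i:i + 2]
--                 break
--         else:
--             return len(chars)
-- ===== Notes on version B (the rewrite author's own statement) =====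
-- stated objective: alternative
-- what changed: Replaces A's single-pass push/pop stack reduction by a fixed-point loop that repeatedly scans for the first adjacent pair with b == a.swapcase(), deletes it, and restarts until no pair remains.
import Mathlib
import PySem

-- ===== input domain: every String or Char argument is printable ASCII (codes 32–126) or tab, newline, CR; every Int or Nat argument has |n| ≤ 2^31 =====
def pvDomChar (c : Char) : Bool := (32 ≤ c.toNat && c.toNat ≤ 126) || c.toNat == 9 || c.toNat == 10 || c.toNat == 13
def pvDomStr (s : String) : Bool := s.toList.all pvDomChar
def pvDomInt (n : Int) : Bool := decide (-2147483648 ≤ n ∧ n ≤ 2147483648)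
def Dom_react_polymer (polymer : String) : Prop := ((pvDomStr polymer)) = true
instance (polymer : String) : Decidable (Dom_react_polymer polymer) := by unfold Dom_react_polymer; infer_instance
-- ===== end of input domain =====

-- B replaces A's one-pass push/pop stack by a fixed-point scan that repeatedly deletes the
-- first adjacent pair (a, b) with b = swapcase a until none remains (alternative, not faster).

-- Python str.swapcase, exact on the ASCII domain (toggles a-z/A-Z, identity otherwise).
def pvSwap (c : Char) : Char :=
  if 97 ≤ c.toNat ∧ c.toNat ≤ 122 then Char.ofNat (c.toNat - 32)
  else if 65 ≤ c.toNat ∧ c.toNat ≤ 90 then Char.ofNat (c.toNat + 32)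
  else c

-- ===== PORT A =====
-- one step of A's loop body: processed[-1]/pop()/append at the END of the list
def stepA (processed : List Char) (c : Char) : List Char :=
  match processed.getLast? with
  | some t => if c = pvSwap t then processed.dropLast else processed ++ [c]
  | none => processed ++ [c]

def react_polymer (polymer : String) : Int :=
  ((polymer.toList.foldl stepA []).length : Int)

-- ===== PORT B =====
-- one left-to-right scan: remove the FIRST adjacent pair (a, b) with b = swapcase a, if any
def scanB : List Char → Option (List Char)
  | a :: b :: rest =>
      if b = pvSwap a then some rest
      else (scanB (b :: rest)).map (a :: ·)
  | _ => none

theorem scanB_length {xs ys : List Char} (h : scanB xs = some ys) :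
    ys.length + 2 = xs.length := by
  induction xs generalizing ys with
  | nil => simp [scanB] at h
  | cons a xs ih =>
    match xs, h with
    | b :: rest, hsome =>
      rw [scanB] at hsome
      split at hsome
      · cases hsome; simp
      · rcases Option.map_eq_some_iff.mp hsome with ⟨zs, hz, rfl⟩
        have := ih hz
        simpa using this

-- while True: delete the first pair, restart; stop when a full scan removes nothing
def loopB (xs : List Char) : List Char :=
  match h : scanB xs with
  | some ys => loopB ys
  | none => xs
termination_by xs.length
decreasing_by have := scanB_length h; omega

def react_polymer_alt (polymer : String) : Int :=
  ((loopB polymer.toList).length : Int)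

-- ===== PRECONDITION & SPEC =====
def Spec_react_polymer (polymer : String) (out : Int) : Prop := out = react_polymer_alt polymer
instance (polymer : String) (out : Int) : Decidable (Spec_react_polymer polymer out) := by unfold Spec_react_polymer; infer_instance

-- ===== CLAIM (what is proved, stated in full; the proofs are below) =====
def Claim_equal_react_polymer : Prop := ∀ (polymer : String), Dom_react_polymer polymer → Spec_react_polymer polymer (react_polymer polymer)

-- ===== LEMMAS AND PROOFS =====

-- A's stack with its top at the HEAD (A keeps the top at the end); reasoning happens here.
def rstep (s : List Char) (c : Char) : List Char :=
  match s with
  | t :: rest => if c = pvSwap t then rest else c :: t :: rest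
  | [] => [c]

theorem pvSwap_invol (c : Char) : pvSwap (pvSwap c) = c := by
  unfold pvSwap
  by_cases h1 : 97 ≤ c.toNat ∧ c.toNat ≤ 122
  · have ht : (Char.ofNat (c.toNat - 32)).toNat = c.toNat - 32 := by
      simp [Char.ofNat, (Or.inl (by omega) : Nat.isValidChar (c.toNat - 32))]
    rw [if_pos h1, ht, if_neg (by omega), if_pos (by omega),
      (by omega : c.toNat - 32 + 32 = c.toNat), Char.ofNat_toNat]
  · by_cases h2 : 65 ≤ c.toNat ∧ c.toNat ≤ 90
    · have ht : (Char.ofNat (c.toNat + 32)).toNat = c.toNat + 32 := by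
        simp [Char.ofNat, (Or.inl (by omega) : Nat.isValidChar (c.toNat + 32))]
      rw [if_neg h1, if_pos h2, ht, if_pos (by omega),
        (by omega : c.toNat + 32 - 32 = c.toNat), Char.ofNat_toNat]
    · simp [h1, h2]

theorem stepA_reverse (p : List Char) (c : Char) :
    (stepA p c).reverse = rstep p.reverse c := by
  induction p using List.reverseRecOn with
  | nil => simp [stepA, rstep]
  | append_singleton q t _ =>
    simp only [stepA, List.getLast?_append, List.getLast?_singleton,
      List.reverse_append, List.reverse_singleton]
    by_cases h : c = pvSwap t <;> simp [h, rstep]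

theorem foldA_reverse (xs : List Char) (p : List Char) :
    (xs.foldl stepA p).reverse = xs.foldl rstep p.reverse := by
  induction xs generalizing p with
  | nil => rfl
  | cons x xs ih => simp only [List.foldl_cons, ih, stepA_reverse]

-- invariant of the stack: no adjacent cancelling pair (top first)
def Red (s : List Char) : Prop := List.IsChain (fun a b => a ≠ pvSwap b) s

theorem red_rstep {s : List Char} (h : Red s) (c : Char) : Red (rstep s c) := by
  match s with
  | [] => simp [rstep, Red]
  | t :: rest =>
    unfold rstep
    by_cases hc : c = pvSwap t
    · simpa [hc, Red] using h.tail
    · simp only [hc, if_false, Red]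
      exact List.isChain_cons.mpr ⟨fun y hy => by simp at hy; simpa [hy] using hc, h⟩

theorem red_foldl (xs : List Char) {s : List Char} (h : Red s) : Red (xs.foldl rstep s) := by
  induction xs generalizing s with
  | nil => exact h
  | cons x xs ih => exact ih (red_rstep h x)

theorem rstep_cancel {s : List Char} (h : Red s) (a : Char) :
    rstep (rstep s a) (pvSwap a) = s := by
  match s with
  | [] => simp [rstep]
  | t :: rest =>
    unfold rstep
    by_cases hc : a = pvSwap t
    · simp only [hc, if_true]
      have hswap : pvSwap (pvSwap t) = t := pvSwap_invol t
      match rest with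
      | [] => simp [hswap]
      | r :: rest' =>
        have hne : t ≠ pvSwap r := (List.isChain_cons.mp h).1 r (by simp)
        simp [hswap, hne]
    · simp [hc]

-- deleting one adjacent cancelling pair does not change the stack fold
theorem foldl_removePair (u v : List Char) (a : Char) :
    (u ++ a :: pvSwap a :: v).foldl rstep [] = (u ++ v).foldl rstep [] := by
  have hred : Red (u.foldl rstep []) := red_foldl u (by simp [Red])

  simp only [List.foldl_append, List.foldl_cons]
  rw [rstep_cancel hred]

theorem scanB_some {xs ys : List Char} (h : scanB xs = some ys) :
    ∃ u a v, xs = u ++ a :: pvSwap a :: v ∧ ys = u ++ v := by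
  induction xs generalizing ys with
  | nil => simp [scanB] at h
  | cons a xs ih =>
    match xs, h with
    | b :: rest, h =>
      rw [scanB] at h
      split at h
      · rename_i hb
        cases h
        exact ⟨[], a, ys, by simp [hb], by simp⟩
      · rcases Option.map_eq_some_iff.mp h with ⟨zs, hz, rfl⟩
        rcases ih hz with ⟨u, x, v, hxs, hzs⟩
        exact ⟨a :: u, x, v, by simp [hxs], by simp [hzs]⟩

theorem scanB_none {xs : List Char} (h : scanB xs = none) :
    List.IsChain (fun a b => b ≠ pvSwap a) xs := by
  induction xs with
  | nil => exact List.isChain_nil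
  | cons a xs ih =>
    match xs with
    | [] => simp
    | b :: rest =>
      rw [scanB] at h
      split at h
      · exact absurd h (by simp)
      · rename_i hb
        exact List.isChain_cons.mpr
          ⟨fun y hy => by simp at hy; simpa [hy] using hb, ih (by simpa using h)⟩

-- with no adjacent cancelling pair the stack fold just reverses the list
theorem nocancel_fold (xs : List Char) (s : List Char)
    (hch : List.IsChain (fun a b => b ≠ pvSwap a) xs)
    (hhd : ∀ t, s.head? = some t → ∀ x, xs.head? = some x → x ≠ pvSwap t) :
    xs.foldl rstep s = xs.reverse ++ s := by
  induction xs generalizing s with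
  | nil => simp
  | cons x xs ih =>
    have hstep : rstep s x = x :: s := by
      match s with
      | [] => simp [rstep]
      | t :: rest =>
        have := hhd t (by simp) x (by simp)
        simp [rstep, this]
    simp only [List.foldl_cons, hstep]
    rw [ih (x :: s) hch.tail ?_]
    · simp
    · intro t ht y hy
      simp at ht
      subst ht
      match xs, hy with
      | y :: _, hy =>
        simp at hy
        subst hy
        exact (List.isChain_cons.mp hch).1 y (by simp)

theorem loopB_fold (xs : List Char) :
    (loopB xs).foldl rstep [] = xs.foldl rstep [] := by
  induction xs using loopB.induct with
  | case1 xs ys h ih =>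
    rw [loopB, h, ih]
    rcases scanB_some h with ⟨u, a, v, rfl, rfl⟩
    exact (foldl_removePair u v a).symm
  | case2 xs h => rw [loopB, h]

theorem loopB_scan_none (xs : List Char) : scanB (loopB xs) = none := by
  induction xs using loopB.induct with
  | case1 xs ys h ih => rw [loopB, h]; exact ih
  | case2 xs h => rw [loopB, h]; exact h

-- ===== VERDICT (by name: the statement is the Claim_ definition above) =====
theorem react_polymer_spec : Claim_equal_react_polymer := by
  intro polymer _
  unfold Spec_react_polymer react_polymer react_polymer_alt
  set l := polymer.toList
  have h1 : (l.foldl stepA []).length = (l.foldl rstep []).length := by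
    have := congrArg List.length (foldA_reverse l [])
    simpa using this
  have h2 : (loopB l).foldl rstep [] = l.foldl rstep [] := loopB_fold l
  have h3 : (loopB l).foldl rstep [] = (loopB l).reverse ++ [] :=
    nocancel_fold _ _ (scanB_none (loopB_scan_none l)) (by simp)
  have : (l.foldl stepA []).length = (loopB l).length := by
    rw [h1, ← h2, h3]; simp
  exact_mod_cast this
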